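-- pv_equiv track=rewrite | github.com/JunZhangErica/XeroTesting | utils/GeneralUtils.py | checkDictsUnique
-- ===== SOURCE A (Python) =====
-- def getValueforDict(dict, keyword):
--     """
--     @dict: the dict to be operated with
--     @keyword: word in the key
--     """
--     for key in dict.keys():
--         if keyword in key:
--             return dict[key]
--     return None
--
-- def checkDictsUnique(dicts, keyword):
--     """
--     Check if there is any value in dicts not unique
--     @dicts: the dicts to be operated with
--     @keyword: word in the key
--     @@return True for unique and False for otherwise
--     """
--     vals = []
--     for dict in dicts:
--         val = getValueforDict(dict, keyword)
--         if val != None: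
--             if val in vals:
--                 return False
--             vals.append(val)
--     return True
-- ===== SOURCE B (Python) =====
-- def getValueforDict(dict, keyword):
--     for key in dict.keys():
--         if keyword in key:
--             return dict[key]
--     return None
--
--
-- def checkDictsUnique(dicts, keyword):
--     vals = [v for v in (getValueforDict(d, keyword) for d in dicts) if v is not None]
--     return len(vals) == len(set(vals))
-- ===== Notes on version B (the rewrite author's own statement) =====
-- stated objective: simpler
-- what changed: Replaced the incremental membership-scan-with-early-return loop by collecting all non-None values in one pass and deciding uniqueness in closed form via len(vals) == len(set(vals)).
import Mathlib
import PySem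

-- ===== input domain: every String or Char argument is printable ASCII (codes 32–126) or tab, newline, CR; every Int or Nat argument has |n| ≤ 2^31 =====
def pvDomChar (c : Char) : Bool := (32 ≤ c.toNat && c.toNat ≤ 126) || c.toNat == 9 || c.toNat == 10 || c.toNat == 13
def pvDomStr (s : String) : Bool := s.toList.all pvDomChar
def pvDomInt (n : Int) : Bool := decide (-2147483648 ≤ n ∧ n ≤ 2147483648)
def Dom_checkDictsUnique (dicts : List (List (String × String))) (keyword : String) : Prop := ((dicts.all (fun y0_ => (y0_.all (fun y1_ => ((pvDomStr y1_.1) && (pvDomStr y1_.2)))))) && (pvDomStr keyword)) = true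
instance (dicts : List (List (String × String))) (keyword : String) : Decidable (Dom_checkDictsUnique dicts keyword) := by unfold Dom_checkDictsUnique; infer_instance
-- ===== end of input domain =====

-- B collects all non-None keyword values in one pass and decides uniqueness as
-- len(vals) == len(set(vals)), replacing A's incremental membership scan with early return.


-- ===== PORT A =====
-- shared helper (identical in Source A and Source B): first value whose key contains keyword
def getValueforDict : List (String × String) → String → Option String
  | [], _ => none
  | (k, v) :: rest, kw => if PySem.Str.isIn kw k then some v else getValueforDict rest kw

-- A's loop: running list `vals`, early return False on a repeat
def pvLoopA (kw : String) : List (List (String × String)) → List String → Bool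
  | [], _ => true
  | d :: rest, vals =>
    match getValueforDict d kw with
    | none => pvLoopA kw rest vals
    | some v => if vals.contains v then false else pvLoopA kw rest (vals ++ [v])

def checkDictsUnique (dicts : List (List (String × String))) (keyword : String) : Bool :=
  pvLoopA keyword dicts []

-- ===== PORT B =====
def checkDictsUnique_alt (dicts : List (List (String × String))) (keyword : String) : Bool :=
  let vals := (dicts.map (fun d => getValueforDict d keyword)).filterMap id
  vals.length == (PySem.Set.ofList vals).length

-- ===== PRECONDITION & SPEC =====
def Spec_checkDictsUnique (dicts : List (List (String × String))) (keyword : String) (out : Bool) : Prop := out = checkDictsUnique_alt dicts keyword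
instance (dicts : List (List (String × String))) (keyword : String) (out : Bool) : Decidable (Spec_checkDictsUnique dicts keyword out) := by unfold Spec_checkDictsUnique; infer_instance

-- ===== CLAIM (what is proved, stated in full; the proofs are below) =====
def Claim_equal_checkDictsUnique : Prop := ∀ (dicts : List (List (String × String))) (keyword : String), Dom_checkDictsUnique dicts keyword → Spec_checkDictsUnique dicts keyword (checkDictsUnique dicts keyword)

-- ===== LEMMAS AND PROOFS =====

-- folding Set.add grows the list by at most one per element
theorem pv_foldl_add_le (xs : List String) (s : PySem.Set String) :
    (xs.foldl PySem.Set.add s).length ≤ s.length + xs.length := by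
  induction xs generalizing s with
  | nil => simp
  | cons x xs ih =>
    simp only [List.foldl_cons]
    refine le_trans (ih _) ?_
    simp only [PySem.Set.add]
    split
    · simp
    · simp only [List.length_append, List.length_cons, List.length_nil]
      omega

-- folding Set.add reaches full length exactly when s ++ xs has no duplicates
theorem pv_foldl_add_len (xs : List String) (s : PySem.Set String) (hs : s.Nodup) :
    (xs.foldl PySem.Set.add s).length = s.length + xs.length ↔ (s ++ xs).Nodup := by
  induction xs generalizing s with
  | nil => simpa using hs
  | cons x xs ih =>
    simp only [List.foldl_cons, PySem.Set.add]
    by_cases hx : x ∈ s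
    · rw [if_pos (by simpa [PySem.Set.contains_eq_listContains] using hx)]
      constructor
      · intro h
        have := pv_foldl_add_le xs s
        simp [List.length_cons] at h
        omega
      · intro h
        rw [List.nodup_append] at h
        exact absurd (h.2.2 x hx x (by simp)) (fun hne => hne rfl)
    · rw [if_neg (by simpa [PySem.Set.contains_eq_listContains] using hx)]
      have hs' : (s ++ [x]).Nodup := by
        rw [List.nodup_append]
        refine ⟨hs, List.nodup_singleton x, ?_⟩
        intro a ha b hb
        simp only [List.mem_singleton] at hb
        subst hb
        exact fun e => hx (e ▸ ha)
      rw [show s ++ x :: xs = (s ++ [x]) ++ xs by simp, ← ih (s ++ [x]) hs']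
      simp only [List.length_append, List.length_cons, List.length_nil]
      omega

-- uniqueness via set cardinality = Nodup
theorem pv_len_ofList (xs : List String) :
    (xs.length == (PySem.Set.ofList xs).length) = decide xs.Nodup := by
  have h := pv_foldl_add_len xs [] (by simp)
  simp only [List.nil_append, List.length_nil, Nat.zero_add] at h
  by_cases hn : xs.Nodup
  · simp [PySem.Set.ofList, PySem.Set.empty, h.mpr hn, hn]
  · have hne : (List.foldl PySem.Set.add [] xs).length ≠ xs.length := fun e => hn (h.mp e)
    simp only [PySem.Set.ofList, PySem.Set.empty, decide_eq_false hn, beq_eq_false_iff_ne,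
      ne_eq]
    exact fun e => hne e.symm

-- A's loop computes Nodup of vals ++ values still to be collected
theorem pv_loopA_eq (kw : String) (l : List (List (String × String))) (vals : List String)
    (h : vals.Nodup) :
    pvLoopA kw l vals = decide ((vals ++ (l.map (fun d => getValueforDict d kw)).filterMap id).Nodup) := by
  induction l generalizing vals with
  | nil => simp [pvLoopA, h]
  | cons d rest ih =>
    cases hv : getValueforDict d kw with
    | none => simpa [pvLoopA, hv] using ih vals h
    | some v =>
      by_cases hm : v ∈ vals
      · have hnot : ¬ (vals ++ v :: (rest.map (fun d => getValueforDict d kw)).filterMap id).Nodup := by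
          intro hn
          rw [List.nodup_append] at hn
          exact absurd (hn.2.2 v hm v (by simp)) (fun hne => hne rfl)
        simp only [pvLoopA, hv, List.map_cons, List.filterMap_cons, id_eq,
          if_pos (show vals.contains v = true by simpa using hm)]
        exact (decide_eq_false hnot).symm
      · have h' : (vals ++ [v]).Nodup := by
          rw [List.nodup_append]
          refine ⟨h, List.nodup_singleton v, ?_⟩
          intro a ha b hb
          simp only [List.mem_singleton] at hb
          subst hb
          exact fun e => hm (e ▸ ha)
        simp only [pvLoopA, hv, List.map_cons, List.filterMap_cons, id_eq,
          if_neg (show ¬ vals.contains v = true by simpa using hm)]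
        rw [ih (vals ++ [v]) h', List.append_assoc, List.singleton_append]
        rfl

-- ===== VERDICT (by name: the statement is the Claim_ definition above) =====
theorem checkDictsUnique_spec : Claim_equal_checkDictsUnique := by
  intro dicts keyword _
  unfold Spec_checkDictsUnique checkDictsUnique checkDictsUnique_alt
  rw [pv_loopA_eq keyword dicts [] (by simp)]
  simp only [List.nil_append]
  rw [pv_len_ofList]
  rfl
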